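-- pv_equiv track=rewrite | github.com/Kodsport/april-fools-2024 | problems/divisibilitytest/submissions/accepted/harry.py | check11
-- ===== SOURCE A (Python) =====
-- def check11(n):
--     odd = even = 0
--     for i in range(len(n)):
--         if i%2:
--             odd += n[i]
--         else:
--             even += n[i]
--
--     return (odd-even)%11 == 0
-- ===== SOURCE B (Python) =====
-- def check11(n):
--     r = 0
--     for d in n:
--         r = (r * 10 + d) % 11
--     return r == 0
-- ===== Notes on version B (the rewrite author's own statement) =====
-- stated objective: alternative
-- what changed: Replaces the index-parity odd/even bucket loop and alternating-sum test by a single Horner-style fold that accumulates the number's residue mod 11 ((r*10+d)%11) and tests it for zero, relying on 10 ≡ -1 (mod 11).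
import Mathlib
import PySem

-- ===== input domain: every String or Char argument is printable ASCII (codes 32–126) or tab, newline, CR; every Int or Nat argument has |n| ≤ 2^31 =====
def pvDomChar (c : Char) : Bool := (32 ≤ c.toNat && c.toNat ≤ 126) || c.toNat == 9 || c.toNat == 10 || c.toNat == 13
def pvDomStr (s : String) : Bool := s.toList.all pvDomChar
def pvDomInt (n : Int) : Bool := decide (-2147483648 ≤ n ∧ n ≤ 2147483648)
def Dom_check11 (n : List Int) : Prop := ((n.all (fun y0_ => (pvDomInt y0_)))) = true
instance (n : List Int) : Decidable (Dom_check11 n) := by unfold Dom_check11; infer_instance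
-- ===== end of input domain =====

-- B replaces the odd/even index-bucket alternating-sum loop by a Horner-style fold of the running residue mod 11 (10 ≡ -1 mod 11); an alternative algorithm of the same cost.

-- ===== PORT A =====
def check11 (n : List Int) : Bool :=
  let st := (PySem.List.pyRange 0 (n.length : Int) 1).foldl
    (fun (oe : Int × Int) i =>
      if PySem.Int.mod i 2 ≠ 0 then (oe.1 + PySem.List.pyGetD n i 0, oe.2)
      else (oe.1, oe.2 + PySem.List.pyGetD n i 0))
    (0, 0)
  PySem.Int.mod (st.1 - st.2) 11 == 0

-- ===== PORT B =====
def check11_alt (n : List Int) : Bool :=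
  (n.foldl (fun r d => PySem.Int.mod (r * 10 + d) 11) 0) == 0

-- ===== PRECONDITION & SPEC =====
def Spec_check11 (n : List Int) (out : Bool) : Prop := out = check11_alt n
instance (n : List Int) (out : Bool) : Decidable (Spec_check11 n out) := by unfold Spec_check11; infer_instance

-- ===== CLAIM (what is proved, stated in full; the proofs are below) =====
def Claim_equal_check11 : Prop := ∀ (n : List Int), Dom_check11 n → Spec_check11 n (check11 n)

-- ===== LEMMAS AND PROOFS =====

-- A's loop state as a function of the list
def aFold (n : List Int) : Int × Int :=
  (PySem.List.pyRange 0 (n.length : Int) 1).foldl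
    (fun (oe : Int × Int) i =>
      if PySem.Int.mod i 2 ≠ 0 then (oe.1 + PySem.List.pyGetD n i 0, oe.2)
      else (oe.1, oe.2 + PySem.List.pyGetD n i 0))
    (0, 0)

def hornerF (n : List Int) : Int := n.foldl (fun val d => val * 10 + d) 0

theorem check11_eq_aFold (n : List Int) :
    check11 n = (PySem.Int.mod ((aFold n).1 - (aFold n).2) 11 == 0) := rfl

theorem hornerF_append (n : List Int) (x : Int) :
    hornerF (n ++ [x]) = hornerF n * 10 + x := by
  simp [hornerF]


theorem pyGetD_append_left (n m : List Int) (i d : Int) (h0 : 0 ≤ i)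
    (h1 : i < (n.length : Int)) :
    PySem.List.pyGetD (n ++ m) i d = PySem.List.pyGetD n i d := by
  rw [PySem.List.pyGetD_eq_getElem (n ++ m) d h0 (by simp; omega),
      PySem.List.pyGetD_eq_getElem n d h0 h1]
  exact List.getElem_append_left (by omega)

theorem aFold_append (n : List Int) (x : Int) :
    aFold (n ++ [x]) =
      if PySem.Int.mod (n.length : Int) 2 ≠ 0 then
        ((aFold n).1 + x, (aFold n).2)
      else ((aFold n).1, (aFold n).2 + x) := by
  unfold aFold
  have hx : PySem.List.pyGetD (n ++ [x]) (n.length : Int) 0 = x := by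
    rw [PySem.List.pyGetD_eq_getElem (n ++ [x]) 0 (by omega) (by simp)]
    simp
  have hcongr :
      (PySem.List.pyRange 0 (n.length : Int) 1).foldl
        (fun (oe : Int × Int) i =>
          if PySem.Int.mod i 2 ≠ 0 then (oe.1 + PySem.List.pyGetD (n ++ [x]) i 0, oe.2)
          else (oe.1, oe.2 + PySem.List.pyGetD (n ++ [x]) i 0)) (0, 0) =
      (PySem.List.pyRange 0 (n.length : Int) 1).foldl
        (fun (oe : Int × Int) i =>
          if PySem.Int.mod i 2 ≠ 0 then (oe.1 + PySem.List.pyGetD n i 0, oe.2)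
          else (oe.1, oe.2 + PySem.List.pyGetD n i 0)) (0, 0) := by
    apply PySem.List.foldl_congr_mem
    intro acc i hi
    rcases (PySem.List.mem_pyRange_one).1 hi with ⟨ha, hb⟩
    rw [pyGetD_append_left n [x] i 0 ha hb]
  rw [show (((n ++ [x]).length : Nat) : Int) = (n.length : Int) + 1 by simp,
      PySem.List.pyRange_one_succ_right (by omega), List.foldl_append, hcongr]
  simp only [List.foldl_cons, List.foldl_nil, hx]

-- parity of the Python test i % 2 != 0 for a Nat-cast index
theorem modtwo_ne_zero_iff (L : Nat) :
    (PySem.Int.mod (L : Int) 2 ≠ 0) ↔ L % 2 = 1 := by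
  rw [PySem.Int.mod_eq_emod_of_pos (by norm_num : (0:Int) < 2)]
  omega

-- key invariant: Horner value ≡ (-1)^len · (odd - even)  (mod 11)
theorem key (n : List Int) :
    (11 : Int) ∣ hornerF n - (-1 : Int) ^ n.length * ((aFold n).1 - (aFold n).2) := by
  induction n using List.reverseRecOn with
  | nil =>
    norm_num [hornerF, aFold, PySem.List.pyRange_one_eq_nil le_rfl]
  | append_singleton n x ih =>
    rw [hornerF_append, aFold_append]
    obtain ⟨k, hk⟩ := ih
    rcases Nat.even_or_odd n.length with he | ho
    · have h2 : n.length % 2 = 0 := Nat.even_iff.1 he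
      rw [if_neg (by rw [modtwo_ne_zero_iff]; omega)]
      rw [he.neg_one_pow] at hk
      rw [show (-1 : Int) ^ (n ++ [x]).length = -1 by
        simp only [List.length_append, List.length_singleton]
        exact (Even.add_one he).neg_one_pow]
      refine ⟨10 * k + ((aFold n).1 - (aFold n).2), ?_⟩
      simp only []
      linarith
    · have h2 : n.length % 2 = 1 := Nat.odd_iff.1 ho
      rw [if_pos (by rw [modtwo_ne_zero_iff]; omega)]
      rw [ho.neg_one_pow] at hk
      rw [show (-1 : Int) ^ (n ++ [x]).length = 1 by
        simp only [List.length_append, List.length_singleton]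
        exact (Odd.add_one ho).neg_one_pow]
      refine ⟨10 * k - ((aFold n).1 - (aFold n).2), ?_⟩
      simp only []
      linarith

theorem dvd_iff_dvd (n : List Int) :
    ((11 : Int) ∣ (aFold n).1 - (aFold n).2) ↔ (11 : Int) ∣ hornerF n := by
  have h := key n
  rcases Nat.even_or_odd n.length with he | ho
  · rw [he.neg_one_pow] at h; obtain ⟨k, hk⟩ := h
    constructor
    · rintro ⟨m, hm⟩; exact ⟨k + m, by linarith⟩
    · rintro ⟨m, hm⟩; exact ⟨m - k, by linarith⟩
  · rw [ho.neg_one_pow] at h; obtain ⟨k, hk⟩ := h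
    constructor
    · rintro ⟨m, hm⟩; exact ⟨k - m, by linarith⟩
    · rintro ⟨m, hm⟩; exact ⟨k - m, by linarith⟩

-- B's running residue equals the full Horner value mod 11
theorem mFold_emod (n : List Int) (r h : Int) (hr : r = h % 11) :
    n.foldl (fun r d => PySem.Int.mod (r * 10 + d) 11) r
      = (n.foldl (fun v d => v * 10 + d) h) % 11 := by
  induction n generalizing r h with
  | nil => simpa using hr
  | cons d t ih =>
    simp only [List.foldl_cons]
    apply ih
    rw [PySem.Int.mod_eq_emod_of_pos (by norm_num : (0:Int) < 11), hr]
    exact Int.ModEq.add_right d (Int.ModEq.mul_right 10 (Int.emod_emod_of_dvd h dvd_rfl))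

-- ===== VERDICT (by name: the statement is the Claim_ definition above) =====
theorem check11_spec : Claim_equal_check11 := by
  intro n _
  unfold Spec_check11
  rw [check11_eq_aFold]
  unfold check11_alt
  rw [mFold_emod n 0 0 (by norm_num)]
  rw [Bool.eq_iff_iff]
  simp only [beq_iff_eq, PySem.Int.mod_eq_zero_iff_dvd]
  rw [← Int.dvd_iff_emod_eq_zero]
  exact dvd_iff_dvd n
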